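-- pv_equiv track=rewrite | github.com/zhangxinfang520/suanfa | 金山云.py | get_mat_length
-- ===== SOURCE A (Python) =====
-- def get_mat_length(N,nums):
--     res = 0
--     temp = list(set(nums))
--     nums = sorted(temp,key=nums.index)
--     N = len(nums)
--     for i in range(0,N-2):
--         if i != 0 and nums[i-1] == nums[i]:
--             continue
--         for j in range(i+1,N-1):
--             if j !=i+1 and nums[j-1] == nums[j]:
--                 continue
--             k = N-1
--             while j < k:
--                 if nums[i] < nums[j] and nums[j] < nums[k]:
--                     res = max(res,nums[i]+nums[j]+nums[k])
--                 k -=1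
--     return res
-- ===== SOURCE B (Python) =====
-- def get_mat_length(N, nums):
--     # dedup keeping first occurrences
--     vals = []
--     for v in nums:
--         if v not in vals:
--             vals.append(v)
--     res = 0
--     n = len(vals)
--     for j in range(1, n - 1):
--         vj = vals[j]
--         left = max((x for x in vals[:j] if x < vj), default=None)
--         right = max((x for x in vals[j+1:] if x > vj), default=None)
--         if left is not None and right is not None:
--             res = max(res, left + vj + right)
--     return res
-- ===== Notes on version B (the rewrite author's own statement) =====
-- stated objective: faster
-- what changed: Replaces A's three nested index loops over all (i,j,k) triples by a single pass over each middle element j, combining the maximum smaller value to its left with the maximum larger value to its right (O(n^2) instead of O(n^3) after the same ordered dedup).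
import Mathlib
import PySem

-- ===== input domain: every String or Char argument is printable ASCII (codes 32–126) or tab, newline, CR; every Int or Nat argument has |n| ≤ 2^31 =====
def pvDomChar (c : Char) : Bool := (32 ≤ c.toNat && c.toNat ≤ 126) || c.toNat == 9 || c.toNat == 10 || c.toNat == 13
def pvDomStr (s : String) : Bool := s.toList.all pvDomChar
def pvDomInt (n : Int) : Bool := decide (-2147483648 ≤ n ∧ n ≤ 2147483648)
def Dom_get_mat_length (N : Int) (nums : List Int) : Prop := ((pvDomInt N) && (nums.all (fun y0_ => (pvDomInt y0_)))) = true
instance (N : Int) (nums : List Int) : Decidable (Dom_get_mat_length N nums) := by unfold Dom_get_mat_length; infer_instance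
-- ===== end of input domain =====

-- B replaces A's O(n^3) triple loop by, for each middle element, max smaller value on the left
-- plus max larger value on the right (O(n^2)); same ordered dedup, same result.

-- ===== PORT A =====
-- the 'while j < k: ... k -= 1' loop of A
def pvWhileK (L : List Int) (i j k : Int) (res : Int) : Int :=
  if h : j < k then
    pvWhileK L i j (k - 1)
      (if PySem.List.pyGetD L i 0 < PySem.List.pyGetD L j 0 ∧ PySem.List.pyGetD L j 0 < PySem.List.pyGetD L k 0
       then max res (PySem.List.pyGetD L i 0 + PySem.List.pyGetD L j 0 + PySem.List.pyGetD L k 0)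
       else res)
  else res
termination_by (k - j).toNat
decreasing_by omega

def get_mat_length (N : Int) (nums : List Int) : Int :=
  let temp : List Int := PySem.Set.ofList nums
  let nums' := PySem.List.sorted temp (fun v => ((PySem.List.index? nums v).getD 0 : Nat)) false
  let n : Int := nums'.length
  (PySem.List.pyRange 0 (n - 2) 1).foldl (fun res i =>
    if i ≠ 0 ∧ PySem.List.pyGetD nums' (i - 1) 0 = PySem.List.pyGetD nums' i 0 then res
    else (PySem.List.pyRange (i + 1) (n - 1) 1).foldl (fun res j =>
      if j ≠ i + 1 ∧ PySem.List.pyGetD nums' (j - 1) 0 = PySem.List.pyGetD nums' j 0 then res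
      else pvWhileK nums' i j (n - 1) res) res) 0

-- ===== PORT B =====
def get_mat_length_alt (N : Int) (nums : List Int) : Int :=
  let vals := nums.foldl (fun acc v => if v ∈ acc then acc else acc ++ [v]) ([] : List Int)
  let n : Int := vals.length
  (PySem.List.pyRange 1 (n - 1) 1).foldl (fun res j =>
    let vj := PySem.List.pyGetD vals j 0
    let left := PySem.List.max? ((PySem.List.slice vals none (some j)).filter (fun x => decide (x < vj))) (fun x => x)
    let right := PySem.List.max? ((PySem.List.slice vals (some (j + 1)) none).filter (fun x => decide (vj < x))) (fun x => x)
    match left, right with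
    | some l, some r => max res (l + vj + r)
    | _, _ => res) 0

-- ===== PRECONDITION & SPEC =====
def Spec_get_mat_length (N : Int) (nums : List Int) (out : Int) : Prop := out = get_mat_length_alt N nums
instance (N : Int) (nums : List Int) (out : Int) : Decidable (Spec_get_mat_length N nums out) := by unfold Spec_get_mat_length; infer_instance

-- ===== CLAIM (what is proved, stated in full; the proofs are below) =====
def Claim_equal_get_mat_length : Prop := ∀ (N : Int) (nums : List Int), Dom_get_mat_length N nums → Spec_get_mat_length N nums (get_mat_length N nums)

-- ===== LEMMAS AND PROOFS =====

-- value at an Int index (proof-side shorthand)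
def pvG (L : List Int) (t : Int) : Int := PySem.List.pyGetD L t 0

-- the candidate sums A's triple loop ranges over
def pvCandA (L : List Int) : List Int :=
  (PySem.List.pyRange 0 ((L.length : Int) - 2) 1).flatMap fun i =>
  (PySem.List.pyRange (i + 1) ((L.length : Int) - 1) 1).flatMap fun j =>
  (PySem.List.pyRange ((L.length : Int) - 1) j (-1)).filterMap fun k =>
    if pvG L i < pvG L j ∧ pvG L j < pvG L k then some (pvG L i + pvG L j + pvG L k) else none

def pvLeft (L : List Int) (j : Int) : Option Int :=
  PySem.List.max? ((PySem.List.slice L none (some j)).filter (fun x => decide (x < PySem.List.pyGetD L j 0))) (fun x => x)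

def pvRight (L : List Int) (j : Int) : Option Int :=
  PySem.List.max? ((PySem.List.slice L (some (j + 1)) none).filter (fun x => decide (PySem.List.pyGetD L j 0 < x))) (fun x => x)

-- the candidate sums B's middle loop ranges over
def pvCandB (L : List Int) : List Int :=
  (PySem.List.pyRange 1 ((L.length : Int) - 1) 1).filterMap fun j =>
    match pvLeft L j, pvRight L j with
    | some l, some r => some (l + pvG L j + r)
    | _, _ => none

lemma pv_le_foldl_max (l : List Int) (a : Int) : a ≤ l.foldl max a := by
  induction l generalizing a with
  | nil => simp
  | cons x t ih => exact le_trans (le_max_left a x) (ih (max a x))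

lemma pv_mem_le_foldl_max {x : Int} {l : List Int} (a : Int) (hx : x ∈ l) : x ≤ l.foldl max a := by
  induction l generalizing a with
  | nil => cases hx
  | cons y t ih =>
    rcases List.mem_cons.1 hx with rfl | hx'
    · exact le_trans (le_max_right a x) (pv_le_foldl_max t _)
    · exact ih _ hx'

lemma pv_foldl_max_le {l : List Int} {a b : Int} (hab : a ≤ b) (h : ∀ x ∈ l, x ≤ b) :
    l.foldl max a ≤ b := by
  induction l generalizing a with
  | nil => simpa using hab
  | cons y t ih =>
    exact ih (max_le hab (h y (List.mem_cons_self))) (fun x hx => h x (List.mem_cons_of_mem _ hx))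

lemma pv_foldl_max_eq {xs ys : List Int}
    (h1 : ∀ x ∈ xs, ∃ y ∈ ys, x ≤ y) (h2 : ∀ y ∈ ys, ∃ x ∈ xs, y ≤ x) :
    xs.foldl max 0 = ys.foldl max 0 := by
  refine le_antisymm (pv_foldl_max_le (pv_le_foldl_max _ 0) ?_) (pv_foldl_max_le (pv_le_foldl_max _ 0) ?_)
  · intro x hx
    obtain ⟨y, hy, hxy⟩ := h1 x hx
    exact le_trans hxy (pv_mem_le_foldl_max 0 hy)
  · intro y hy
    obtain ⟨x, hx, hyx⟩ := h2 y hy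
    exact le_trans hyx (pv_mem_le_foldl_max 0 hx)

lemma pv_foldl_filterMap {α : Type} (h : α → Option Int) (l : List α) (a : Int) :
    l.foldl (fun r x => match h x with | some y => max r y | none => r) a
      = (l.filterMap h).foldl max a := by
  induction l generalizing a with
  | nil => rfl
  | cons x t ih =>
    simp only [List.foldl_cons, List.filterMap_cons]
    cases h x <;> simp [ih]

lemma pv_foldl_if_max {α : Type} (p : α → Prop) [DecidablePred p] (f : α → Int) (l : List α) (a : Int) :
    l.foldl (fun r x => if p x then max r (f x) else r) a
      = (l.filterMap (fun x => if p x then some (f x) else none)).foldl max a := by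
  induction l generalizing a with
  | nil => rfl
  | cons x t ih =>
    simp only [List.foldl_cons, List.filterMap_cons]
    by_cases hp : p x <;> simp [hp, ih]

lemma pvWhileK_eq (L : List Int) (i j k res : Int) :
    pvWhileK L i j k res
      = (PySem.List.pyRange k j (-1)).foldl
          (fun r kk => if pvG L i < pvG L j ∧ pvG L j < pvG L kk then max r (pvG L i + pvG L j + pvG L kk) else r) res := by
  generalize hn : (k - j).toNat = n
  induction n generalizing k res with
  | zero =>
    rw [pvWhileK, dif_neg (by omega), PySem.List.pyRange_neg_one_eq_nil (by omega)]
    rfl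
  | succ m ih =>
    have hk : j < k := by omega
    rw [pvWhileK, dif_pos hk, PySem.List.pyRange_neg_one_cons hk]
    simp only [List.foldl_cons, pvG]
    exact ih _ _ (by omega)

lemma pv_g_ne {L : List Int} (hN : L.Nodup) {a b : Int}
    (h0 : 0 ≤ a) (hab : a < b) (hb : b < (L.length : Int)) : pvG L a ≠ pvG L b := by
  intro h
  rw [pvG, pvG, PySem.List.pyGetD_eq_getElem L 0 h0 (by omega),
      PySem.List.pyGetD_eq_getElem L 0 (by omega) hb] at h
  have := hN.getElem_inj_iff.mp h
  omega

lemma pvA_eq (L : List Int) (hN : L.Nodup) :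
    ((PySem.List.pyRange 0 ((L.length : Int) - 2) 1).foldl (fun res i =>
      if i ≠ 0 ∧ PySem.List.pyGetD L (i - 1) 0 = PySem.List.pyGetD L i 0 then res
      else (PySem.List.pyRange (i + 1) ((L.length : Int) - 1) 1).foldl (fun res j =>
        if j ≠ i + 1 ∧ PySem.List.pyGetD L (j - 1) 0 = PySem.List.pyGetD L j 0 then res
        else pvWhileK L i j ((L.length : Int) - 1) res) res) 0)
      = (pvCandA L).foldl max 0 := by
  unfold pvCandA
  rw [List.foldl_flatMap]
  apply PySem.List.foldl_congr_mem
  intro acc i hi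
  rw [PySem.List.mem_pyRange_one] at hi
  rw [List.foldl_flatMap]
  rw [if_neg (by
    rintro ⟨hne, heq⟩
    exact pv_g_ne hN (a := i - 1) (b := i) (by omega) (by omega) (by omega) heq)]
  apply PySem.List.foldl_congr_mem
  intro acc2 j hj
  rw [PySem.List.mem_pyRange_one] at hj
  rw [if_neg (by
    rintro ⟨hne, heq⟩
    exact pv_g_ne hN (a := j - 1) (b := j) (by omega) (by omega) (by omega) heq)]
  rw [pvWhileK_eq, pv_foldl_if_max]

lemma pvB_eq (L : List Int) :
    ((PySem.List.pyRange 1 ((L.length : Int) - 1) 1).foldl (fun res j =>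
      match PySem.List.max? ((PySem.List.slice L none (some j)).filter (fun x => decide (x < PySem.List.pyGetD L j 0))) (fun x => x),
            PySem.List.max? ((PySem.List.slice L (some (j + 1)) none).filter (fun x => decide (PySem.List.pyGetD L j 0 < x))) (fun x => x) with
      | some l, some r => max res (l + PySem.List.pyGetD L j 0 + r)
      | _, _ => res) 0)
      = (pvCandB L).foldl max 0 := by
  unfold pvCandB
  rw [← pv_foldl_filterMap]
  apply PySem.List.foldl_congr_mem
  intro acc j hj
  cases h1 : PySem.List.max? ((PySem.List.slice L none (some j)).filter (fun x => decide (x < PySem.List.pyGetD L j 0))) (fun x => x) <;>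
    cases h2 : PySem.List.max? ((PySem.List.slice L (some (j + 1)) none).filter (fun x => decide (PySem.List.pyGetD L j 0 < x))) (fun x => x) <;>
    simp [pvLeft, pvRight, pvG, h1, h2]

lemma pv_mem_candA {L : List Int} {x : Int} :
    x ∈ pvCandA L ↔ ∃ i j k : Int, 0 ≤ i ∧ i < j ∧ j < k ∧ k < (L.length : Int) ∧
      pvG L i < pvG L j ∧ pvG L j < pvG L k ∧ x = pvG L i + pvG L j + pvG L k := by
  unfold pvCandA
  simp only [List.mem_flatMap, List.mem_filterMap, PySem.List.mem_pyRange_one,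
    PySem.List.mem_pyRange_neg_one]
  constructor
  · rintro ⟨i, ⟨hi0, hi2⟩, j, ⟨hj1, hj2⟩, k, ⟨hk1, hk2⟩, hif⟩
    split at hif
    · rename_i hcond
      obtain rfl := Option.some.inj hif
      exact ⟨i, j, k, by omega, by omega, by omega, by omega, hcond.1, hcond.2, rfl⟩
    · cases hif
  · rintro ⟨i, j, k, hi0, hij, hjk, hk, h1, h2, rfl⟩
    exact ⟨i, ⟨hi0, by omega⟩, j, ⟨by omega, by omega⟩, k, ⟨by omega, by omega⟩,
      by rw [if_pos ⟨h1, h2⟩]⟩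

lemma pv_mem_candB {L : List Int} {x : Int} :
    x ∈ pvCandB L ↔ ∃ j : Int, 1 ≤ j ∧ j < (L.length : Int) - 1 ∧
      ∃ l r, pvLeft L j = some l ∧ pvRight L j = some r ∧ x = l + pvG L j + r := by
  unfold pvCandB
  simp only [List.mem_filterMap, PySem.List.mem_pyRange_one]
  constructor
  · rintro ⟨j, ⟨hj1, hj2⟩, hm⟩
    cases h1 : pvLeft L j <;> cases h2 : pvRight L j <;> rw [h1, h2] at hm
    · cases hm
    · cases hm
    · cases hm
    · obtain rfl := Option.some.inj hm
      exact ⟨j, hj1, hj2, _, _, h1, h2, rfl⟩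
  · rintro ⟨j, hj1, hj2, l, r, h1, h2, rfl⟩
    exact ⟨j, ⟨hj1, hj2⟩, by rw [h1, h2]⟩

lemma pvLeft_some {L : List Int} {i j : Int} (h0 : 0 ≤ i) (hij : i < j) (hj : j < (L.length : Int))
    (hlt : pvG L i < pvG L j) : ∃ l, pvLeft L j = some l ∧ pvG L i ≤ l := by
  have hmem : pvG L i ∈ (L.take j.toNat).filter (fun x => decide (x < PySem.List.pyGetD L j 0)) := by
    rw [List.mem_filter]
    refine ⟨?_, by simpa [pvG] using hlt⟩
    rw [pvG, PySem.List.pyGetD_eq_getElem L 0 h0 (by omega), List.mem_take_iff_getElem]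
    exact ⟨i.toNat, by omega, rfl⟩
  rw [pvLeft, PySem.List.slice_to L (by omega)]
  cases hmax : PySem.List.max? ((L.take j.toNat).filter (fun x => decide (x < PySem.List.pyGetD L j 0))) (fun x => x) with
  | none =>
    rw [PySem.List.max?_eq_none_iff] at hmax
    rw [hmax] at hmem
    cases hmem
  | some l => exact ⟨l, rfl, PySem.List.max?_isMax hmax _ hmem⟩

lemma pvLeft_mem {L : List Int} {j l : Int} (hj0 : 1 ≤ j) (h : pvLeft L j = some l) :
    l < pvG L j ∧ ∃ i : Int, 0 ≤ i ∧ i < j ∧ i < (L.length : Int) ∧ pvG L i = l := by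
  rw [pvLeft, PySem.List.slice_to L (by omega)] at h
  have hl := PySem.List.max?_mem h
  rw [List.mem_filter] at hl
  obtain ⟨hmem, hdec⟩ := hl
  refine ⟨by simpa [pvG] using of_decide_eq_true hdec, ?_⟩
  rw [List.mem_take_iff_getElem] at hmem
  obtain ⟨m, hm, hEq⟩ := hmem
  have hmL : m < L.length := by omega
  refine ⟨(m : Int), by omega, by omega, by omega, ?_⟩
  rw [pvG, PySem.List.pyGetD_eq_getElem L 0 (by omega) (by omega)]
  simpa using hEq

lemma pvRight_some {L : List Int} {j k : Int} (hj0 : 0 ≤ j) (hjk : j < k) (hk : k < (L.length : Int))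
    (hlt : pvG L j < pvG L k) : ∃ r, pvRight L j = some r ∧ pvG L k ≤ r := by
  have hmem : pvG L k ∈ (L.drop (j + 1).toNat).filter (fun x => decide (PySem.List.pyGetD L j 0 < x)) := by
    rw [List.mem_filter]
    refine ⟨?_, by simpa [pvG] using hlt⟩
    rw [pvG, PySem.List.pyGetD_eq_getElem L 0 (by omega) hk, List.mem_iff_getElem]
    have hd : k.toNat - (j + 1).toNat < (L.drop (j + 1).toNat).length := by
      rw [List.length_drop]; omega
    refine ⟨k.toNat - (j + 1).toNat, hd, ?_⟩
    rw [List.getElem_drop]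
    congr 1
    omega
  rw [pvRight, PySem.List.slice_from L (by omega)]
  cases hmax : PySem.List.max? ((L.drop (j + 1).toNat).filter (fun x => decide (PySem.List.pyGetD L j 0 < x))) (fun x => x) with
  | none =>
    rw [PySem.List.max?_eq_none_iff] at hmax
    rw [hmax] at hmem
    cases hmem
  | some r => exact ⟨r, rfl, PySem.List.max?_isMax hmax _ hmem⟩

lemma pvRight_mem {L : List Int} {j r : Int} (hj0 : 0 ≤ j) (h : pvRight L j = some r) :
    pvG L j < r ∧ ∃ k : Int, j < k ∧ k < (L.length : Int) ∧ pvG L k = r := by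
  rw [pvRight, PySem.List.slice_from L (by omega)] at h
  have hr := PySem.List.max?_mem h
  rw [List.mem_filter] at hr
  obtain ⟨hmem, hdec⟩ := hr
  refine ⟨by simpa [pvG] using of_decide_eq_true hdec, ?_⟩
  rw [List.mem_iff_getElem] at hmem
  obtain ⟨d, hd, hEq⟩ := hmem
  rw [List.getElem_drop] at hEq
  have hdL : (j + 1).toNat + d < L.length := by
    rw [List.length_drop] at hd; omega
  refine ⟨((j + 1).toNat + d : Nat), by omega, by omega, ?_⟩
  rw [pvG, PySem.List.pyGetD_eq_getElem L 0 (by omega) (by omega)]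
  convert hEq using 2

lemma pv_B_subset_A {L : List Int} {x : Int} (hx : x ∈ pvCandB L) : x ∈ pvCandA L := by
  rw [pv_mem_candB] at hx
  obtain ⟨j, hj1, hjn, l, r, hl, hr, rfl⟩ := hx
  obtain ⟨hlj, i, hi0, hij, hin, hgi⟩ := pvLeft_mem hj1 hl
  obtain ⟨hjr, k, hjk, hkn, hgk⟩ := pvRight_mem (by omega) hr
  rw [pv_mem_candA]
  exact ⟨i, j, k, hi0, hij, hjk, hkn, by omega, by omega, by omega⟩

lemma pv_A_le_B {L : List Int} {x : Int} (hx : x ∈ pvCandA L) : ∃ y ∈ pvCandB L, x ≤ y := by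
  rw [pv_mem_candA] at hx
  obtain ⟨i, j, k, hi0, hij, hjk, hkn, hgij, hgjk, rfl⟩ := hx
  obtain ⟨l, hl, hil⟩ := pvLeft_some hi0 hij (by omega) hgij
  obtain ⟨r, hr, hkr⟩ := pvRight_some (by omega) hjk hkn hgjk
  refine ⟨l + pvG L j + r, ?_, by omega⟩
  rw [pv_mem_candB]
  exact ⟨j, by omega, by omega, l, r, hl, hr, rfl⟩

lemma pv_dedup_eq (nums : List Int) :
    nums.foldl (fun acc v => if v ∈ acc then acc else acc ++ [v]) ([] : List Int)
      = PySem.Set.ofList nums := by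
  rw [PySem.Set.ofList_eq_foldl]
  exact PySem.List.foldl_congr_mem _ _ _ _ (fun acc x _ => (PySem.Set.add_eq_ite acc x).symm)

lemma pv_idx_pairwise (nums : List Int) :
    List.Pairwise (fun a b => ((PySem.List.index? nums a).getD 0 : Nat) < ((PySem.List.index? nums b).getD 0 : Nat))
      (PySem.Set.ofList nums) := by
  induction nums with
  | nil => simp [PySem.Set.ofList_nil]
  | cons x xs ih =>
    rw [PySem.Set.ofList_cons]
    constructor
    · intro b hb
      rw [PySem.Set.mem_discard] at hb
      obtain ⟨hbs, hbx⟩ := hb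
      have hbxs : b ∈ xs := (PySem.Set.mem_ofList _ _).mp hbs
      obtain ⟨m, hm⟩ := Option.isSome_iff_exists.mp
        ((PySem.List.index?_isSome_iff xs b).mpr hbxs)
      rw [PySem.List.index?_cons_self, PySem.List.index?_cons_of_ne xs (Ne.symm hbx), hm]
      simp
    · refine List.Pairwise.imp_of_mem ?_ (ih.filter _)
      intro a b ha hb hab
      have ha' : a ∈ (PySem.Set.ofList xs).discard x := ha
      have hb' : b ∈ (PySem.Set.ofList xs).discard x := hb
      rw [PySem.Set.mem_discard] at ha' hb'
      obtain ⟨has, hax⟩ := ha'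
      obtain ⟨hbs, hbx⟩ := hb'
      obtain ⟨ma, hma⟩ := Option.isSome_iff_exists.mp
        ((PySem.List.index?_isSome_iff xs a).mpr ((PySem.Set.mem_ofList _ _).mp has))
      obtain ⟨mb, hmb⟩ := Option.isSome_iff_exists.mp
        ((PySem.List.index?_isSome_iff xs b).mpr ((PySem.Set.mem_ofList _ _).mp hbs))
      rw [PySem.List.index?_cons_of_ne xs (Ne.symm hax),
          PySem.List.index?_cons_of_ne xs (Ne.symm hbx), hma, hmb]
      rw [hma, hmb] at hab
      simpa using Nat.add_lt_add_right (by simpa using hab) 1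

lemma pv_sorted_eq (nums : List Int) :
    PySem.List.sorted (PySem.Set.ofList nums) (fun v => ((PySem.List.index? nums v).getD 0 : Nat)) false
      = PySem.Set.ofList nums :=
  PySem.List.sorted_eq_of_perm_of_pairwise_lt _ _ _ (List.Perm.refl _) (pv_idx_pairwise nums)

-- ===== VERDICT (by name: the statement is the Claim_ definition above) =====
theorem get_mat_length_spec : Claim_equal_get_mat_length := by
  intro N nums _
  unfold Spec_get_mat_length get_mat_length get_mat_length_alt
  simp only [pv_dedup_eq, pv_sorted_eq]
  rw [pvA_eq _ (PySem.Set.nodup_ofList nums), pvB_eq]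
  exact pv_foldl_max_eq (fun x hx => pv_A_le_B hx)
    (fun y hy => ⟨y, pv_B_subset_A hy, le_rfl⟩)
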